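-- pv_equiv track=rewrite | github.com/DOINYNAM/Baekjoon_Hub | 프로그래머스/unrated/135808. 과일 장수/과일 장수.py | solution
-- ===== SOURCE A (Python) =====
-- def solution(k, m, score):
--     score = sorted(score, reverse = True)
--     m_cnt = m
--     result = 0
--     in_box = []
--
--     for i in score:
--         if m_cnt == 1:
--             in_box.append(i)
--             result += in_box[-1] * m
--             m_cnt = m
--             in_box = []
--
--         else:
--             in_box.append(i)
--             m_cnt -= 1
--
--     return result
-- ===== SOURCE B (Python) =====
-- def solution(k, m, score):
--     if m <= 0:
--         return 0
--     s = sorted(score, reverse=True)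
--     total = 0
--     while len(s) >= m:
--         total += s[m - 1] * m
--         s = s[m:]
--     return total
-- ===== Notes on version B (the rewrite author's own statement) =====
-- stated objective: simpler
-- what changed: Replaces the per-element countdown counter and the in_box accumulator list with a chunk loop on the sorted list that directly reads each full box's minimum at index m-1 and drops the box.
import Mathlib
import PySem

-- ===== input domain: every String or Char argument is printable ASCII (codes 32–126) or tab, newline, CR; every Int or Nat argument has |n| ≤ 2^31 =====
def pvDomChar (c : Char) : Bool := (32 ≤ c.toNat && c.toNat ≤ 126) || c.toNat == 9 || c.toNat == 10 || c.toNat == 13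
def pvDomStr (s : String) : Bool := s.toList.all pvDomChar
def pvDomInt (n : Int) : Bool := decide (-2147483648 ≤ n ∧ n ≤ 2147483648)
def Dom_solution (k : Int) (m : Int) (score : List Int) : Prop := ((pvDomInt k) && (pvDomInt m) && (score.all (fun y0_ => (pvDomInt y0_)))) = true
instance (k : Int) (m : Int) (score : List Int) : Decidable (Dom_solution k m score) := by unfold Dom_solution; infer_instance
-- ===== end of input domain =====

-- B replaces A's per-element countdown counter and in_box list with a chunk loop on the sorted
-- list that reads each full box's minimum at index m-1 and drops the box (simpler; same cost).

-- ===== PORT A =====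
-- step for the for-loop body of A (m is the box size captured from the arguments)
def solStep (m : Int) (st : Int × Int × List Int) (i : Int) : Int × Int × List Int :=
  if st.1 == 1 then
    (m, st.2.1 + (PySem.List.pyGetD (st.2.2 ++ [i]) (-1) 0) * m, ([] : List Int))
  else
    (st.1 - 1, st.2.1, st.2.2 ++ [i])

def solution (k : Int) (m : Int) (score : List Int) : Int :=
  let s := PySem.List.sorted score (fun x => x) true
  (s.foldl (solStep m) (m, 0, ([] : List Int))).2.1

-- ===== PORT B =====
-- the while-loop of B: consume one full box of m scores per step
-- (the '1 ≤ m' conjunct only makes the recursion total; B calls it with m ≥ 1)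
def altLoop (m : Nat) (total : Int) (s : List Int) : Int :=
  if _h : m ≤ s.length ∧ 1 ≤ m then
    altLoop m (total + (s.getD (m - 1) 0) * (m : Int)) (s.drop m)
  else total
termination_by s.length
decreasing_by simp; omega

def solution_alt (k : Int) (m : Int) (score : List Int) : Int :=
  if m ≤ 0 then 0
  else altLoop m.toNat 0 (PySem.List.sorted score (fun x => x) true)

-- ===== PRECONDITION & SPEC =====
def Spec_solution (k : Int) (m : Int) (score : List Int) (out : Int) : Prop := out = solution_alt k m score
instance (k : Int) (m : Int) (score : List Int) (out : Int) : Decidable (Spec_solution k m score out) := by unfold Spec_solution; infer_instance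

-- ===== CLAIM (what is proved, stated in full; the proofs are below) =====
def Claim_equal_solution : Prop := ∀ (k : Int) (m : Int) (score : List Int), Dom_solution k m score → Spec_solution k m score (solution k m score)

-- ===== LEMMAS AND PROOFS =====

-- intermediate spec: sum (times m) of the elements closing each box, with c slots left in the current box
def pick (m : Int) (M : Nat) : List Int → Nat → Int
  | [], _ => 0
  | x :: xs, c => if c = 1 then x * m + pick m M xs M else pick m M xs (c - 1)

theorem foldl_solStep_nonpos (m : Int) (l : List Int) :
    ∀ (c r : Int) (box : List Int), c ≤ 0 →
      (l.foldl (solStep m) (c, r, box)).2.1 = r := by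
  induction l with
  | nil => intro c r box _; simp
  | cons x xs ih =>
    intro c r box hc
    have hne : (c == 1) = false := by simp; omega
    simp only [List.foldl, solStep, hne, Bool.false_eq_true, if_false]
    exact ih (c - 1) r (box ++ [x]) (by omega)

theorem foldl_solStep_pick (M : Nat) (hM1 : 1 ≤ M) (l : List Int) :
    ∀ (c : Nat) (r : Int) (box : List Int), 1 ≤ c →
      (l.foldl (solStep (M : Int)) ((c : Int), r, box)).2.1 = r + pick (M : Int) M l c := by
  induction l with
  | nil => intro c r box _; simp [pick]
  | cons x xs ih =>
    intro c r box hc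
    by_cases h1 : c = 1
    · subst h1
      simp only [List.foldl, solStep, Nat.cast_one, BEq.rfl, if_true,
        PySem.List.pyGetD_neg_one_append_singleton, pick]
      rw [ih M (r + x * (M : Int)) [] hM1]
      ring
    · have hne : ((c : Int) == (1 : Int)) = false := by simp; omega
      simp only [List.foldl, solStep, hne, Bool.false_eq_true, if_false, pick, if_neg h1]
      have hcast : (c : Int) - 1 = ((c - 1 : Nat) : Int) := by omega
      rw [hcast, ih (c - 1) r (box ++ [x]) (by omega)]

theorem pick_unfold (m : Int) (M : Nat) (l : List Int) :
    ∀ (c : Nat), 1 ≤ c →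
      pick m M l c =
        (if c ≤ l.length then (l.getD (c - 1) 0) * m + pick m M (l.drop c) M else 0) := by
  induction l with
  | nil =>
    intro c hc
    simp only [pick, List.length_nil]
    rw [if_neg (by omega)]
  | cons x xs ih =>
    intro c hc
    by_cases h1 : c = 1
    · subst h1
      simp [pick]
    · obtain ⟨d, rfl⟩ : ∃ d, c = d + 2 := ⟨c - 2, by omega⟩
      have hgd : (x :: xs).getD (d + 2 - 1) 0 = xs.getD (d + 2 - 1 - 1) 0 := by
        simp
      have hdrop : (x :: xs).drop (d + 2) = xs.drop (d + 2 - 1) := by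
        simp
      simp only [pick, if_neg h1]
      rw [ih (d + 2 - 1) (by omega), hgd, hdrop]
      by_cases h2 : d + 2 - 1 ≤ xs.length
      · rw [if_pos h2, if_pos (by simp [List.length_cons]; omega)]
      · rw [if_neg h2, if_neg (by simp [List.length_cons]; omega)]

theorem altLoop_eq_pick (M : Nat) (hM1 : 1 ≤ M) (l : List Int) :
    ∀ (t : Int), altLoop M t l = t + pick (M : Int) M l M := by
  induction hn : l.length using Nat.strong_induction_on generalizing l with
  | _ n ih =>
    intro t
    by_cases h : M ≤ l.length
    · rw [altLoop, dif_pos ⟨h, hM1⟩]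
      have hlt : (l.drop M).length < n := by simp [← hn]; omega
      rw [ih _ hlt (l.drop M) rfl]
      rw [pick_unfold (M : Int) M l M hM1, if_pos h]
      ring
    · rw [altLoop, dif_neg (by omega)]
      rw [pick_unfold (M : Int) M l M hM1, if_neg h]
      ring

-- ===== VERDICT (by name: the statement is the Claim_ definition above) =====
theorem solution_spec : Claim_equal_solution := by
  intro k m score _
  unfold Spec_solution solution solution_alt
  by_cases hm : m ≤ 0
  · simp only [if_pos hm]
    exact foldl_solStep_nonpos m _ m 0 [] hm
  · simp only [if_neg hm]
    set M := m.toNat with hMdef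
    have hM1 : 1 ≤ M := by omega
    have hM : ((M : Nat) : Int) = m := by omega
    rw [← hM]
    rw [altLoop_eq_pick M hM1]
    rw [foldl_solStep_pick M hM1
      (PySem.List.sorted score (fun x => x) true) M 0 [] hM1]
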